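-- pv_equiv track=rewrite | github.com/xyyandhtl/EmbodiedGenAgent | EG_agent/vlmap/utils/object.py | find_max_common_elements
-- ===== SOURCE A (Python) =====
-- def find_max_common_elements(
--
--     data: dict,
-- ) -> tuple:
--     # Find max common elements in split info
--
--     max_common_count = 0
--     max_common_pair = (None, None)
--
--     class_ids = list(data.keys())
--
--     for i in range(len(class_ids)):
--         for j in range(i + 1, len(class_ids)):
--             class_id1 = class_ids[i]
--             class_id2 = class_ids[j]
--
--             deque1 = data[class_id1]
--             deque2 = data[class_id2]
--
--             # jump the empty deque
--             if not deque1 or not deque2: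
--                 continue
--
--             set1 = set(deque1)
--             set2 = set(deque2)
--
--             common_elements = set1 & set2
--             common_count = len(common_elements)
--
--             if common_count > max_common_count:
--                 max_common_count = common_count
--                 max_common_pair = (class_id1, class_id2)
--
--     max_common_tuple = (max_common_count, max_common_pair)
--
--     return max_common_tuple
-- ===== SOURCE B (Python) =====
-- def find_max_common_elements(
--
--     data: dict,
-- ) -> tuple:
--     # Inverted index (element -> classes) + pair co-occurrence counts,
--     # then replay the i<j order for the tie-break.
--
--     class_ids = list(data.keys())
--
--     # element -> ordered list of the classes whose deque contains it
--     index = {}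
--     for cid in class_ids:
--         for e in dict.fromkeys(data[cid]):
--             index[e] = index.get(e, []) + [cid]
--
--     # co-occurrence count for each ordered class pair
--     counts = {}
--     for classes in index.values():
--         rest = list(classes)
--         while rest:
--             a = rest.pop(0)
--             for b in rest:
--                 counts[(a, b)] = counts.get((a, b), 0) + 1
--
--     max_common_count = 0
--     max_common_pair = (None, None)
--     for i in range(len(class_ids)):
--         for j in range(i + 1, len(class_ids)):
--             pair = (class_ids[i], class_ids[j])
--             c = counts.get(pair, 0)
--             if c > max_common_count:
--                 max_common_count = c
--                 max_common_pair = pair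
--
--     return (max_common_count, max_common_pair)
-- ===== Notes on version B (the rewrite author's own statement) =====
-- stated objective: faster
-- what changed: Replaces A's per-pair set intersections with an inverted index (element -> classes in key order) whose pair co-occurrence counts are accumulated once, then replays the i<j order with O(1) lookups for the tie-break.
import Mathlib
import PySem

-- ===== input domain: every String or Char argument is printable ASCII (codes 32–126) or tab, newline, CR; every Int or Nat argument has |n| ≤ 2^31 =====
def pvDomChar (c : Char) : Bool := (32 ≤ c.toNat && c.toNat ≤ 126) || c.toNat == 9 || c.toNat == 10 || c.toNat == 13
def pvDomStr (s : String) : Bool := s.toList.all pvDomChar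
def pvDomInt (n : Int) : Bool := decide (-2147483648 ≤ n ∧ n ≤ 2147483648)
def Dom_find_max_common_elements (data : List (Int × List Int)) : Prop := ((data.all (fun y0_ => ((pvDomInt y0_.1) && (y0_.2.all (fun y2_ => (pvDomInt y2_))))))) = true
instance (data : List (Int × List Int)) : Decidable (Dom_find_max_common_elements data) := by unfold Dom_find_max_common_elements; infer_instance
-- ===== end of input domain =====

-- B replaces A's per-pair set intersections by an inverted index (element -> classes) with
-- pair co-occurrence counts, replaying the i<j order for the tie-break: measurably faster.

-- ===== PORT A =====
def find_max_common_elements (data : List (Int × List Int)) : Int × (Option Int × Option Int) :=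
  let d := PySem.Dict.ofList data
  let classIds := d.keys
  (PySem.List.pyRange 0 (PySem.List.len classIds) 1).foldl (fun st i =>
    (PySem.List.pyRange (i + 1) (PySem.List.len classIds) 1).foldl (fun st j =>
      let classId1 := PySem.List.pyGetD classIds i 0
      let classId2 := PySem.List.pyGetD classIds j 0
      let deque1 := d.getD classId1 []
      let deque2 := d.getD classId2 []
      -- jump the empty deque
      if deque1 = [] ∨ deque2 = [] then st
      else
        let set1 := PySem.Set.ofList deque1
        let set2 := PySem.Set.ofList deque2
        let commonCount := PySem.Set.len (PySem.Set.inter set1 set2)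
        if commonCount > st.1 then (commonCount, (some classId1, some classId2)) else st) st)
    ((0 : Int), ((none : Option Int), (none : Option Int)))

-- ===== PORT B =====
-- the 'while rest: a = rest.pop(0); for b in rest: counts[(a,b)] += 1' loop of Source B
def pvB_pairCounts : List Int → PySem.Dict (Int × Int) Int → PySem.Dict (Int × Int) Int
  | [], cnts => cnts
  | a :: rest, cnts =>
      pvB_pairCounts rest (rest.foldl (fun c b => c.modify (a, b) 0 (· + 1)) cnts)

def find_max_common_elements_alt (data : List (Int × List Int)) : Int × (Option Int × Option Int) :=
  let d := PySem.Dict.ofList data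
  let classIds := d.keys
  -- element -> ordered list of the classes whose deque contains it
  let index := classIds.foldl (fun idx cid =>
      (PySem.List.dedup (d.getD cid [])).foldl (fun idx e => idx.modify e [] (· ++ [cid])) idx)
    PySem.Dict.empty
  -- co-occurrence count for each ordered class pair
  let counts := index.values.foldl (fun cnts classes => pvB_pairCounts classes cnts) PySem.Dict.empty
  (PySem.List.pyRange 0 (PySem.List.len classIds) 1).foldl (fun st i =>
    (PySem.List.pyRange (i + 1) (PySem.List.len classIds) 1).foldl (fun st j =>
      let pair := (PySem.List.pyGetD classIds i 0, PySem.List.pyGetD classIds j 0)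
      let c := counts.getD pair 0
      if c > st.1 then (c, (some pair.1, some pair.2)) else st) st)
    ((0 : Int), ((none : Option Int), (none : Option Int)))

-- ===== PRECONDITION & SPEC =====
def Spec_find_max_common_elements (data : List (Int × List Int)) (out : Int × (Option Int × Option Int)) : Prop := out = find_max_common_elements_alt data
instance (data : List (Int × List Int)) (out : Int × (Option Int × Option Int)) : Decidable (Spec_find_max_common_elements data out) := by unfold Spec_find_max_common_elements; infer_instance

-- ===== CLAIM (what is proved, stated in full; the proofs are below) =====
def Claim_equal_find_max_common_elements : Prop := ∀ (data : List (Int × List Int)), Dom_find_max_common_elements data → Spec_find_max_common_elements data (find_max_common_elements data)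

-- ===== LEMMAS AND PROOFS =====

-- the suffix of m strictly after the first occurrence of x ([] if x ∉ m)
def pvAfter : List Int → Int → List Int
  | [], _ => []
  | c :: cs, x => if c = x then cs else pvAfter cs x

-- all ordered pairs (earlier, later) of m
def pvLexPairs : List Int → List (Int × Int)
  | [] => []
  | a :: rest => rest.map (fun b => (a, b)) ++ pvLexPairs rest

lemma pvAfter_nil_of_not_mem {m : List Int} {x : Int} (h : x ∉ m) : pvAfter m x = [] := by
  induction m with
  | nil => rfl
  | cons c cs ih =>
      simp only [List.mem_cons, not_or] at h
      simp [pvAfter, Ne.symm h.1, ih h.2]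

lemma pvB_pairCounts_getD (cl : List Int) (cnts : PySem.Dict (Int × Int) Int) (v : Int × Int) :
    (pvB_pairCounts cl cnts).getD v 0 = cnts.getD v 0 + ((pvLexPairs cl).count v : Int) := by
  induction cl generalizing cnts with
  | nil => simp [pvB_pairCounts, pvLexPairs]
  | cons a rest ih =>
      rw [pvB_pairCounts, ih]
      have hmap : rest.foldl (fun c b => c.modify (a, b) 0 (· + 1)) cnts
          = (rest.map (fun b => (a, b))).foldl (fun c p => c.modify p 0 (· + 1)) cnts := by
        rw [List.foldl_map]
      rw [hmap, PySem.Dict.getD_foldl_modify_add_one]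
      simp [pvLexPairs, List.count_append]
      ring

lemma counts_foldl_getD (vals : List (List Int)) (cnts : PySem.Dict (Int × Int) Int) (v : Int × Int) :
    (vals.foldl (fun c cl => pvB_pairCounts cl c) cnts).getD v 0
      = cnts.getD v 0 + ((vals.flatMap pvLexPairs).count v : Int) := by
  induction vals generalizing cnts with
  | nil => simp
  | cons cl vals ih =>
      rw [List.foldl_cons, ih, pvB_pairCounts_getD]
      simp [List.count_append]
      ring

-- count of (x, y) in the ordered pairs of a duplicate-free list
lemma count_pvLexPairs (m : List Int) (h : m.Nodup) (x y : Int) :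
    (pvLexPairs m).count (x, y) = if y ∈ pvAfter m x then 1 else 0 := by
  induction m with
  | nil => simp [pvLexPairs, pvAfter]
  | cons c cs ih =>
      have hnd := h
      rw [List.nodup_cons] at hnd
      rw [pvLexPairs, List.count_append, ih hnd.2]
      by_cases hcx : c = x
      · subst hcx
        have h1 : (cs.map (fun b => (c, b))).count (c, y) = cs.count y := by
          rw [List.count, List.countP_map, List.count]
          congr 1
          funext b
          simp
        have h2 : pvAfter cs c = [] := pvAfter_nil_of_not_mem hnd.1
        rw [h1, h2]
        have h3 : (if y ∈ ([] : List Int) then 1 else 0) = 0 := by simp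
        rw [h3, show pvAfter (c :: cs) c = cs from by simp [pvAfter]]
        by_cases hy : y ∈ cs
        · rw [List.count_eq_one_of_mem hnd.2 hy, if_pos hy]
        · rw [List.count_eq_zero_of_not_mem hy, if_neg hy]
      · have h1 : (cs.map (fun b => (c, b))).count (x, y) = 0 := by
          rw [List.count_eq_zero]
          intro hm
          rcases List.mem_map.mp hm with ⟨b, _, hb⟩
          exact hcx (congrArg Prod.fst hb)
        rw [h1]
        simp [pvAfter, hcx]

lemma pvAfter_filter (m : List Int) (h : m.Nodup) (P : Int → Bool) (x : Int) :
    pvAfter (m.filter P) x = if P x then (pvAfter m x).filter P else [] := by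
  induction m with
  | nil => simp [pvAfter]
  | cons c cs ih =>
      have hnd := h
      rw [List.nodup_cons] at hnd
      by_cases hcx : c = x
      · subst hcx
        by_cases hP : P c
        · simp [hP, pvAfter]
        · have hx : c ∉ cs.filter P := fun hm => hnd.1 (List.mem_of_mem_filter hm)
          simp [hP, pvAfter_nil_of_not_mem hx]
      · by_cases hP : P c
        · simp [hP, pvAfter, hcx, ih hnd.2]
        · simp [hP, pvAfter, hcx, ih hnd.2]

lemma pvAfter_getElem (m : List Int) (h : m.Nodup) (i : Nat) (hi : i < m.length) :
    pvAfter m m[i] = m.drop (i + 1) := by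
  induction m generalizing i with
  | nil => simp at hi
  | cons c cs ih =>
      have hnd := h
      rw [List.nodup_cons] at hnd
      cases i with
      | zero => simp [pvAfter]
      | succ k =>
          have hk : k < cs.length := by simpa using hi
          have hne : c ≠ cs[k] := fun he => hnd.1 (he ▸ List.getElem_mem hk)
          simp only [List.getElem_cons_succ, List.drop_succ_cons]
          rw [pvAfter, if_neg hne, ih hnd.2 k hk]

lemma mem_pvAfter_of_lt (m : List Int) (h : m.Nodup) (i j : Nat)
    (hj : j < m.length) (hij : i < j) : m[j] ∈ pvAfter m m[i] := by
  have hi : i < m.length := lt_trans hij hj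
  rw [pvAfter_getElem m h i hi]
  have hj' : j - (i + 1) < (m.drop (i + 1)).length := by
    rw [List.length_drop]; omega
  have : (m.drop (i + 1))[j - (i + 1)] = m[j] := by
    rw [List.getElem_drop]; congr 1; omega
  rw [← this]
  exact List.getElem_mem hj'

-- fold congruence under an invariant
lemma foldl_inv_congr {α σ : Type} (P : σ → Prop) (f g : σ → α → σ) :
    ∀ (xs : List α) (s : σ), P s →
      (∀ st a, a ∈ xs → P st → f st a = g st a ∧ P (f st a)) →
      xs.foldl f s = xs.foldl g s := by
  intro xs
  induction xs with
  | nil => intro s _ _; rfl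
  | cons a xs ih =>
      intro s hs hstep
      have h1 := hstep s a (List.mem_cons_self) hs
      rw [List.foldl_cons, List.foldl_cons, ← h1.1]
      exact ih (f s a) h1.2 (fun st b hb hst => hstep st b (List.mem_cons_of_mem a hb) hst)

lemma foldl_inv {α σ : Type} (P : σ → Prop) (f : σ → α → σ)
    (xs : List α) (s : σ) (hs : P s) (hstep : ∀ st a, a ∈ xs → P st → P (f st a)) :
    P (xs.foldl f s) := by
  induction xs generalizing s with
  | nil => exact hs
  | cons a xs ih =>
      exact ih (f s a) (hstep s a (List.mem_cons_self) hs)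
        (fun st b hb hst => hstep st b (List.mem_cons_of_mem a hb) hst)

-- characterisation of B's inverted index: lookups and key membership
lemma index_getD (d : PySem.Dict Int (List Int)) (ids : List Int)
    (idx : PySem.Dict Int (List Int)) (e : Int) :
    (ids.foldl (fun idx cid =>
        (PySem.List.dedup (d.getD cid [])).foldl (fun idx x => idx.modify x [] (· ++ [cid])) idx) idx).getD e []
      = idx.getD e [] ++ ids.filter (fun c => decide (e ∈ PySem.List.dedup (d.getD c []))) := by
  induction ids generalizing idx with
  | nil => simp
  | cons cid ids ih =>
      rw [List.foldl_cons, ih]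
      have hmap : (PySem.List.dedup (d.getD cid [])).foldl (fun idx x => idx.modify x [] (· ++ [cid])) idx
          = ((PySem.List.dedup (d.getD cid [])).map (fun x => (x, cid))).foldl
              (fun idx p => idx.modify p.1 [] (· ++ [p.2])) idx := by
        rw [List.foldl_map]
      rw [hmap, PySem.Dict.getD_foldl_modify_append]
      have hfil : (((PySem.List.dedup (d.getD cid [])).map (fun x => (x, cid))).filter
            (fun p => p.1 == e)).map (fun p => p.2)
          = if e ∈ PySem.List.dedup (d.getD cid []) then [cid] else [] := by
        rw [List.filter_map, List.map_map]
        have : ((PySem.List.dedup (d.getD cid [])).filter ((fun p => p.1 == e) ∘ (fun x => (x, cid))))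
            = (PySem.List.dedup (d.getD cid [])).filter (fun x => x == e) := by rfl
        rw [this, List.filter_beq]
        by_cases he : e ∈ PySem.List.dedup (d.getD cid [])
        · have hnd : (PySem.List.dedup (d.getD cid [])).Nodup := by
            rw [PySem.List.dedup_eq_ofList]; exact PySem.Set.nodup_ofList _
          have he' : e ∈ d.getD cid [] := by
            rw [PySem.List.dedup_eq_ofList] at he; exact (PySem.Set.mem_ofList _ _).mp he
          rw [List.count_eq_one_of_mem hnd he]
          simp [he']
        · have he' : e ∉ d.getD cid [] := by
            rw [PySem.List.dedup_eq_ofList] at he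
            exact fun h => he ((PySem.Set.mem_ofList _ _).mpr h)
          rw [List.count_eq_zero_of_not_mem he]
          simp [he']
      rw [hfil, List.filter_cons]
      by_cases he : e ∈ PySem.List.dedup (d.getD cid [])
      · have he' : e ∈ d.getD cid [] := by
          rw [PySem.List.dedup_eq_ofList] at he; exact (PySem.Set.mem_ofList _ _).mp he
        simp [he', List.append_assoc]
      · have he' : e ∉ d.getD cid [] := by
          rw [PySem.List.dedup_eq_ofList] at he
          exact fun h => he ((PySem.Set.mem_ofList _ _).mpr h)
        simp [he']

lemma index_keys_mem (d : PySem.Dict Int (List Int)) (ids : List Int)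
    (idx : PySem.Dict Int (List Int)) (e : Int) :
    e ∈ (ids.foldl (fun idx cid =>
        (PySem.List.dedup (d.getD cid [])).foldl (fun idx x => idx.modify x [] (· ++ [cid])) idx) idx).keys
      ↔ e ∈ idx.keys ∨ ∃ c ∈ ids, e ∈ PySem.List.dedup (d.getD c []) := by
  induction ids generalizing idx with
  | nil => simp
  | cons cid ids ih =>
      rw [List.foldl_cons, ih]
      have hk : ((PySem.List.dedup (d.getD cid [])).foldl (fun idx x => idx.modify x [] (· ++ [cid])) idx).keys
          = PySem.Set.update idx.keys ((PySem.List.dedup (d.getD cid [])).map (fun x => x)) := by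
        exact PySem.Dict.keys_foldl_modify_key _ (fun x => x) [] (fun _ _ => (· ++ [cid])) idx
      rw [hk]
      simp only [PySem.Set.mem_update, List.mem_cons, List.mem_map]
      constructor
      · rintro (⟨h | h⟩ | ⟨c, hc, he⟩)
        · exact Or.inl h
        · rcases h with ⟨z, hz, rfl⟩
          exact Or.inr ⟨cid, Or.inl rfl, hz⟩
        · exact Or.inr ⟨c, Or.inr hc, he⟩
      · rintro (h | ⟨c, (rfl | hc), he⟩)
        · exact Or.inl (Or.inl h)
        · exact Or.inl (Or.inr ⟨e, he, rfl⟩)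
        · exact Or.inr ⟨c, hc, he⟩

lemma index_keys_nodup (d : PySem.Dict Int (List Int)) (ids : List Int)
    (idx : PySem.Dict Int (List Int)) (h : idx.keys.Nodup) :
    (ids.foldl (fun idx cid =>
        (PySem.List.dedup (d.getD cid [])).foldl (fun idx x => idx.modify x [] (· ++ [cid])) idx) idx).keys.Nodup := by
  induction ids generalizing idx with
  | nil => exact h
  | cons cid ids ih =>
      rw [List.foldl_cons]
      exact ih _ (PySem.Dict.nodup_keys_foldl_modify_key _ (fun x => x) [] (fun _ _ => (· ++ [cid])) idx h)

-- the central identity: B's pair-count table holds exactly A's per-pair intersection size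
lemma counts_getD_key (d : PySem.Dict Int (List Int)) (hnd : d.keys.Nodup)
    (i j : Nat) (hi : i < d.keys.length) (hj : j < d.keys.length) (hij : i < j) :
    ((d.keys.foldl (fun idx cid =>
        (PySem.List.dedup (d.getD cid [])).foldl (fun idx e => idx.modify e [] (· ++ [cid])) idx)
        PySem.Dict.empty).values.foldl (fun cnts classes => pvB_pairCounts classes cnts)
        PySem.Dict.empty).getD (d.keys[i], d.keys[j]) 0
      = PySem.Set.len (PySem.Set.inter (PySem.Set.ofList (d.getD d.keys[i] []))
          (PySem.Set.ofList (d.getD d.keys[j] []))) := by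
  set l := d.keys with hl
  set x := l[i] with hx
  set y := l[j] with hy
  set index := l.foldl (fun idx cid =>
      (PySem.List.dedup (d.getD cid [])).foldl (fun idx e => idx.modify e [] (· ++ [cid])) idx)
      PySem.Dict.empty with hindex
  have hkeysnd : index.keys.Nodup := by
    rw [hindex]
    exact index_keys_nodup d l PySem.Dict.empty (by simp)
  have hvals : index.values = index.keys.map (fun e => index.getD e []) :=
    PySem.Dict.values_eq_map_keys index hkeysnd []
  have hgetD : ∀ e, index.getD e []
      = l.filter (fun c => decide (e ∈ PySem.List.dedup (d.getD c []))) := by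
    intro e
    rw [hindex, index_getD]
    simp
  have hkeysmem : ∀ e, e ∈ index.keys ↔ ∃ c ∈ l, e ∈ PySem.List.dedup (d.getD c []) := by
    intro e
    rw [hindex, index_keys_mem]
    simp
  rw [counts_foldl_getD, PySem.Dict.getD_empty, hvals, List.flatMap_map, List.count_flatMap]
  have hyaft : y ∈ pvAfter l x := mem_pvAfter_of_lt l hnd i j hj hij
  have hxy : x ≠ y := by
    intro he
    exact absurd (List.Nodup.getElem_inj_iff hnd |>.mp (hx ▸ hy ▸ he)) (by omega)
  -- the per-element contribution is 1 iff the element lies in both deques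
  have hterm : ∀ e ∈ index.keys,
      ((List.count (x, y) ∘ fun e => pvLexPairs (index.getD e [])) e)
        = if (decide (e ∈ d.getD x []) && decide (e ∈ d.getD y [])) then 1 else 0 := by
    intro e _
    have hfnd : (l.filter (fun c => decide (e ∈ PySem.List.dedup (d.getD c [])))).Nodup :=
      List.Nodup.filter _ hnd
    simp only [Function.comp_apply]
    rw [hgetD e, count_pvLexPairs _ hfnd, pvAfter_filter l hnd]
    by_cases hex : e ∈ d.getD x []
    · have hex' : decide (e ∈ PySem.List.dedup (d.getD x [])) = true := by
        simp [hex]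
      rw [if_pos hex']
      by_cases hey : e ∈ d.getD y []
      · simp [hex, hey, hyaft]
      · simp [hey, hyaft]
    · have hex' : decide (e ∈ PySem.List.dedup (d.getD x [])) = false := by
        simp [hex]
      simp [hex]
  rw [List.map_congr_left hterm, PySem.List.sum_map_ite_one_zero_nat, List.countP_eq_length_filter]
  -- the filtered key list is a permutation of A's intersection set
  have hperm : List.Perm
      (index.keys.filter (fun e => decide (e ∈ d.getD x []) && decide (e ∈ d.getD y [])))
      (PySem.Set.inter (PySem.Set.ofList (d.getD x [])) (PySem.Set.ofList (d.getD y []))) := by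
    rw [List.perm_ext_iff_of_nodup (List.Nodup.filter _ hkeysnd)
      (PySem.Set.nodup_inter _ _ (PySem.Set.nodup_ofList _))]
    intro e
    rw [List.mem_filter, PySem.Set.mem_inter, PySem.Set.mem_ofList, PySem.Set.mem_ofList]
    constructor
    · rintro ⟨-, hq⟩
      simp only [Bool.and_eq_true, decide_eq_true_eq] at hq
      exact hq
    · rintro ⟨hex, hey⟩
      refine ⟨(hkeysmem e).mpr ⟨x, List.getElem_mem hi, ?_⟩, by simp [hex, hey]⟩
      simp [hex]
  rw [PySem.Set.len_eq, ← hperm.length_eq]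
  simp

-- ===== VERDICT (by name: the statement is the Claim_ definition above) =====
theorem find_max_common_elements_spec : Claim_equal_find_max_common_elements := by
  intro data _hdom
  unfold Spec_find_max_common_elements find_max_common_elements find_max_common_elements_alt
  dsimp only
  set d := PySem.Dict.ofList data with hd
  set l := d.keys with hl
  have hnd : l.Nodup := PySem.Dict.nodup_keys_ofList data
  set counts := ((l.foldl (fun idx cid =>
      (PySem.List.dedup (d.getD cid [])).foldl (fun idx e => idx.modify e [] (· ++ [cid])) idx)
      PySem.Dict.empty).values.foldl (fun cnts classes => pvB_pairCounts classes cnts)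
      PySem.Dict.empty) with hcounts
  apply Eq.symm
  apply foldl_inv_congr (fun st => 0 ≤ st.1)
  · exact le_refl 0
  · intro st i hi hst
    rw [PySem.List.mem_pyRange_one] at hi
    rw [PySem.List.len_eq] at hi
    constructor
    · -- the inner folds agree pointwise
      apply foldl_inv_congr (fun st => 0 ≤ st.1) _ _ _ _ hst
      intro st j hj hst'
      rw [PySem.List.mem_pyRange_one, PySem.List.len_eq] at hj
      have hi' : i.toNat < l.length := by omega
      have hj' : j.toNat < l.length := by omega
      have hij : i.toNat < j.toNat := by omega
      rw [PySem.List.pyGetD_eq_getElem l 0 (by omega) (by omega),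
          PySem.List.pyGetD_eq_getElem l 0 (by omega) (by omega)]
      have hkey : counts.getD (l[i.toNat], l[j.toNat]) 0
          = PySem.Set.len (PySem.Set.inter (PySem.Set.ofList (d.getD l[i.toNat] []))
              (PySem.Set.ofList (d.getD l[j.toNat] []))) :=
        counts_getD_key d hnd i.toNat j.toNat hi' hj' hij
      rw [hkey]
      constructor
      · by_cases hemp : d.getD l[i.toNat] [] = [] ∨ d.getD l[j.toNat] [] = []
        · rw [if_pos hemp]
          have hzero : PySem.Set.len (PySem.Set.inter (PySem.Set.ofList (d.getD l[i.toNat] []))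
              (PySem.Set.ofList (d.getD l[j.toNat] []))) = 0 := by
            rcases hemp with h | h <;> rw [h] <;> simp [PySem.Set.ofList, PySem.Set.inter]
          rw [hzero, if_neg (by omega)]
        · rw [if_neg hemp]
      · split
        · show 0 ≤ PySem.Set.len _
          rw [PySem.Set.len_eq]
          positivity
        · exact hst'
    · -- the invariant survives B's inner fold
      apply foldl_inv (fun (st : Int × Option Int × Option Int) => 0 ≤ st.1) _ _ _ hst
      intro st' j _ hst'
      dsimp only
      split
      · show 0 ≤ counts.getD _ 0
        rw [hcounts, counts_foldl_getD, PySem.Dict.getD_empty]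
        positivity
      · exact hst'
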